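-- pv_equiv track=rewrite | github.com/BarryZM/Workspace-of-NLU | solutions/classification/ensemble/1_vote/calc_vote_f1.py | calc_voting
-- ===== SOURCE A (Python) =====
-- def calc_voting(row):
--     # ft_pred = row["ft_predict"]
--     bert_pred = row["bert_predict"]
--     cnn_pred = row["cnn_predict"]
--     rnn_pred = row["rnn_predict"]
--     d = [
--         # (ft_pred,0),
--          (cnn_pred, 2),
--          (rnn_pred, 4),
--          (bert_pred, 3)
--          ]
--     cnt = {}
--     for i, p in d:
--         if i not in cnt:
--             cnt[i] = p
--         else:
--             cnt[i] += p
--     res = sorted(cnt.items(), key=lambda x: x[1], reverse=True)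
--     return res[0][0]
-- ===== SOURCE B (Python) =====
-- def calc_voting(row):
--     cnn_pred = row["cnn_predict"]
--     rnn_pred = row["rnn_predict"]
--     bert_pred = row["bert_predict"]
--     # Closed form of the 2/4/3-weighted vote: cnn wins whenever it agrees with
--     # any other model (2+4=6>3 and 2+3=5>4); otherwise rnn's weight 4 (or 4+3
--     # when rnn==bert) is the unique maximum. Ties cannot change this.
--     return cnn_pred if cnn_pred == rnn_pred or cnn_pred == bert_pred else rnn_pred
-- ===== Notes on version B (the rewrite author's own statement) =====
-- stated objective: simpler
-- what changed: Replaced the build-a-weight-dict-then-sort-and-take-top pipeline by a two-comparison closed form: since the weights are fixed (cnn 2, rnn 4, bert 3), cnn wins exactly when it equals rnn or bert, otherwise rnn wins.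
import Mathlib
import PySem

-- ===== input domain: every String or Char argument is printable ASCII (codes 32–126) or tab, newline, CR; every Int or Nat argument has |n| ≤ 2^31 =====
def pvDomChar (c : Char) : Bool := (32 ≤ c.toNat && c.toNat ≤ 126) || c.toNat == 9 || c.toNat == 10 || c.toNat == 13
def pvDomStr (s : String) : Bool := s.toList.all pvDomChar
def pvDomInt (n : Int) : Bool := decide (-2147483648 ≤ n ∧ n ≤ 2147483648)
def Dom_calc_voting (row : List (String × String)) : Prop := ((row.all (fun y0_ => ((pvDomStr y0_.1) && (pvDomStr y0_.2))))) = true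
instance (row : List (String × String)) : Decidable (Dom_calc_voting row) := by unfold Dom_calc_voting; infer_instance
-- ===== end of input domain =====

-- B replaces A's weight-dict + sort pipeline by a two-comparison closed form (simpler, same cost).

-- ===== PORT A =====
def calc_voting (row : List (String × String)) : String :=
  match (PySem.Dict.mk row).get? "bert_predict",
        (PySem.Dict.mk row).get? "cnn_predict",
        (PySem.Dict.mk row).get? "rnn_predict" with
  | some bert_pred, some cnn_pred, some rnn_pred =>
    let d : List (String × Int) := [(cnn_pred, 2), (rnn_pred, 4), (bert_pred, 3)]
    let cnt : PySem.Dict String Int :=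
      d.foldl (fun cnt ip =>
        if ¬ (cnt.contains ip.1 = true) then cnt.insert ip.1 ip.2
        else cnt.modify ip.1 0 (· + ip.2)) PySem.Dict.empty
    let res := PySem.List.sorted cnt.items (fun x => x.2) true
    match PySem.List.pyGet? res 0 with
    | some top => top.1
    | none => ""      -- unreachable: cnt is nonempty
  | _, _, _ => ""     -- KeyError in Python; excluded by Pre_calc_voting

-- ===== PORT B =====
def calc_voting_alt (row : List (String × String)) : String :=
  match (PySem.Dict.mk row).get? "cnn_predict" with
  | none => ""        -- KeyError in Python; excluded by Pre_calc_voting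
  | some cnn_pred =>
    match (PySem.Dict.mk row).get? "rnn_predict" with
    | none => ""      -- KeyError
    | some rnn_pred =>
      match (PySem.Dict.mk row).get? "bert_predict" with
      | none => ""    -- KeyError
      | some bert_pred =>
        if cnn_pred == rnn_pred || cnn_pred == bert_pred then cnn_pred else rnn_pred

-- ===== PRECONDITION & SPEC =====
-- Pre_ excludes exactly the rows missing one of the three prediction keys, on which A raises KeyError.
def Pre_calc_voting (row : List (String × String)) : Prop :=
  (PySem.Dict.mk row).contains "bert_predict" = true ∧
  (PySem.Dict.mk row).contains "cnn_predict" = true ∧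
  (PySem.Dict.mk row).contains "rnn_predict" = true
instance (row : List (String × String)) : Decidable (Pre_calc_voting row) := by unfold Pre_calc_voting; infer_instance
def pvWitness_calc_voting : (List (String × String)) :=
  [("bert_predict", "a"), ("cnn_predict", "b"), ("rnn_predict", "a")]
def Spec_calc_voting (row : List (String × String)) (out : String) : Prop := out = calc_voting_alt row
instance (row : List (String × String)) (out : String) : Decidable (Spec_calc_voting row out) := by unfold Spec_calc_voting; infer_instance

-- ===== CLAIM (what is proved, stated in full; the proofs are below) =====
def Claim_equal_calc_voting : Prop := ∀ (row : List (String × String)), Dom_calc_voting row → Pre_calc_voting row → Spec_calc_voting row (calc_voting row)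

-- ===== LEMMAS AND PROOFS =====

-- The core of A (weights cnn 2, rnn 4, bert 3; counting loop; stable descending sort; take head key)
-- equals B's closed form, by case analysis on the equalities among the three predictions.
theorem vote_core_eq (c r b : String) :
    (let d : List (String × Int) := [(c, 2), (r, 4), (b, 3)]
     let cnt : PySem.Dict String Int :=
       d.foldl (fun cnt ip =>
         if ¬ (cnt.contains ip.1 = true) then cnt.insert ip.1 ip.2
         else cnt.modify ip.1 0 (· + ip.2)) PySem.Dict.empty
     let res := PySem.List.sorted cnt.items (fun x => x.2) true
     match PySem.List.pyGet? res 0 with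
     | some top => top.1
     | none => "") = (if c == r || c == b then c else r) := by
  by_cases hcr : c = r <;> by_cases hcb : c = b <;> by_cases hrb : r = b <;>
    simp_all [List.foldl, PySem.Dict.empty, PySem.Dict.contains, PySem.Dict.insert,
      PySem.Dict.modify, PySem.Dict.getD, PySem.Dict.get?, PySem.List.sorted,
      PySem.List.insertBy, PySem.List.pyGet?, PySem.List.pyIdx?]

theorem calc_voting_spec : Claim_equal_calc_voting := by
  intro row _ hpre
  obtain ⟨hb, hc, hr⟩ := hpre
  unfold Spec_calc_voting calc_voting calc_voting_alt
  rw [PySem.Dict.contains_eq_isSome_get?] at hb hc hr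
  obtain ⟨bp, hgb⟩ := Option.isSome_iff_exists.mp hb
  obtain ⟨cp, hgc⟩ := Option.isSome_iff_exists.mp hc
  obtain ⟨rp, hgr⟩ := Option.isSome_iff_exists.mp hr
  rw [hgb, hgc, hgr]
  exact vote_core_eq cp rp bp
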